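-- pv_equiv track=rewrite | github.com/tvieirabruna/pdf-rag-chatbot | src/document_ingestor.py | organize_image_metadata
-- ===== SOURCE A (Python) =====
-- from typing import List, Dict
--
-- def organize_image_metadata(descriptions: List[Dict]) -> List[Dict]:
--     """Organize the image metadata number by page."""
--     page_counts = {}
--     for description in descriptions:
--         page = description["page"]
--         if page not in page_counts:
--             page_counts[page] = 1
--         else:
--             page_counts[page] += 1
--         description["number"] = page_counts[page]
--
--     return descriptions
-- ===== SOURCE B (Python) =====
-- from typing import List, Dict
--
-- def organize_image_metadata(descriptions: List[Dict]) -> List[Dict]: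
--     """Organize the image metadata number by page: group the entries by page
--     first, then number each page's group sequentially (group-then-number)."""
--     groups = {}
--     for i, description in enumerate(descriptions):
--         groups.setdefault(description["page"], []).append(i)
--     for idxs in groups.values():
--         for number, i in enumerate(idxs, start=1):
--             descriptions[i]["number"] = number
--     return descriptions
-- ===== Notes on version B (the rewrite author's own statement) =====
-- stated objective: alternative
-- what changed: Replaces A's single pass with a running per-page counter dict by a two-phase group-then-number scheme: first build a page -> list-of-entry-indices table, then number each page's group with enumerate(start=1).
import Mathlib
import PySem

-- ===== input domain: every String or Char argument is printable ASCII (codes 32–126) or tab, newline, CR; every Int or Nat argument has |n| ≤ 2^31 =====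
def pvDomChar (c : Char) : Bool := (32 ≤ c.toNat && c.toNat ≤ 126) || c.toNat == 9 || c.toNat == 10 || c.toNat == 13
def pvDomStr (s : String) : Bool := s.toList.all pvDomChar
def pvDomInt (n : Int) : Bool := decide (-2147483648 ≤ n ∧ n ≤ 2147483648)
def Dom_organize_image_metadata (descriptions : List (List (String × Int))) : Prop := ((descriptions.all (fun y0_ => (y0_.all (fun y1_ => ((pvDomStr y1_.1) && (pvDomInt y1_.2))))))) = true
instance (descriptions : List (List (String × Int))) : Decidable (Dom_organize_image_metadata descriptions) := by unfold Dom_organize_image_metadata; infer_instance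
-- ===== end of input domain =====

-- B re-groups the entries by page first and then numbers each group (A keeps a
-- running per-page counter); both mutate the input dicts in Python — the
-- equivalence proved here is about the returned value.

-- ===== PORT A =====
-- A: one pass; page_counts[page] incremented per entry, "number" set to the running count.
def organize_image_metadata (descriptions : List (List (String × Int))) : List (List (String × Int)) :=
  (descriptions.foldl
    (fun (st : PySem.Dict Int Int × List (List (String × Int))) description =>
      match (PySem.Dict.mk description).get? "page" with
      | none => st    -- description["page"] raises KeyError in Python; such inputs are excluded by Pre_
      | some page =>
          let page_counts :=
            if (st.1.contains page) = false
            then st.1.insert page 1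
            else st.1.modify page 0 (· + 1)
          (page_counts,
           st.2 ++ [((PySem.Dict.mk description).insert "number" (page_counts.getD page 0)).items]))
    (PySem.Dict.mk [], [])).2

-- ===== PORT B =====
-- B: first pass groups the entry indices by page (groups.setdefault(page, []).append(i));
-- second pass numbers each group with enumerate(start=1), writing in place by index.
def organize_image_metadata_alt (descriptions : List (List (String × Int))) : List (List (String × Int)) :=
  let groups : PySem.Dict Int (List Int) :=
    (PySem.List.enumerate descriptions).foldl
      (fun g q =>
        match (PySem.Dict.mk q.2).get? "page" with
        | none => g   -- description["page"] raises KeyError in Python; excluded by Pre_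
        | some page => g.modify page [] (· ++ [q.1]))
      (PySem.Dict.mk [])
  groups.values.foldl
    (fun arr idxs =>
      (PySem.List.enumerate idxs 1).foldl
        (fun arr q =>
          -- descriptions[i]["number"] = number; the index q.2 is a nonnegative
          -- position produced by the first pass, so .toNat is exact
          arr.set q.2.toNat (((PySem.Dict.mk (arr.getD q.2.toNat [])).insert "number" q.1).items))
        arr)
    descriptions

-- ===== PRECONDITION & SPEC =====
-- Pre_ excludes exactly the entries without a "page" key, on which A raises KeyError.
def Pre_organize_image_metadata (descriptions : List (List (String × Int))) : Prop :=
  (descriptions.all (fun d => (PySem.Dict.mk d).contains "page")) = true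
instance (descriptions : List (List (String × Int))) : Decidable (Pre_organize_image_metadata descriptions) := by unfold Pre_organize_image_metadata; infer_instance
def pvWitness_organize_image_metadata : (List (List (String × Int))) :=
  [[("page", 1), ("path", 7)], [("page", 2)], [("page", 1), ("number", 9)]]
def Spec_organize_image_metadata (descriptions : List (List (String × Int))) (out : List (List (String × Int))) : Prop := out = organize_image_metadata_alt descriptions
instance (descriptions : List (List (String × Int))) (out : List (List (String × Int))) : Decidable (Spec_organize_image_metadata descriptions out) := by unfold Spec_organize_image_metadata; infer_instance

-- ===== CLAIM (what is proved, stated in full; the proofs are below) =====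
def Claim_equal_organize_image_metadata : Prop := ∀ (descriptions : List (List (String × Int))), Dom_organize_image_metadata descriptions → Pre_organize_image_metadata descriptions → Spec_organize_image_metadata descriptions (organize_image_metadata descriptions)

-- ===== LEMMAS AND PROOFS =====

-- the page of an entry (= its "page" value on entries admitted by Pre_)
def pg (d : List (String × Int)) : Int := (PySem.Dict.mk d).getD "page" 0

-- an entry with the "number" field set to v
def withNum (d : List (String × Int)) (v : Int) : List (String × Int) :=
  ((PySem.Dict.mk d).insert "number" v).items

-- the number A/B assign to the entry at position k: occurrences of its page up to and including it
def rank (l : List (List (String × Int))) (k : Nat) : Int :=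
  ((l.take (k + 1)).countP (fun e => pg e == pg l[k]!) : Int)

-- ---------- A-side ----------

-- A's loop, with the counter dict abstracted
def numb (c : PySem.Dict Int Int) : List (List (String × Int)) → List (List (String × Int))
  | [] => []
  | d :: t => withNum d (c.getD (pg d) 0 + 1) :: numb (c.modify (pg d) 0 (· + 1)) t

theorem numb_congr (l : List (List (String × Int))) : ∀ (c c' : PySem.Dict Int Int),
    (∀ p, c.getD p 0 = c'.getD p 0) → numb c l = numb c' l := by
  induction l with
  | nil => intro c c' _; rfl
  | cons d t ih =>
      intro c c' h
      simp only [numb, h (pg d)]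
      refine congrArg _ (ih _ _ ?_)
      intro p
      simp [PySem.Dict.getD_modify, h p, h (pg d)]

theorem foldlA_eq_numb (l : List (List (String × Int))) :
    ∀ (c : PySem.Dict Int Int) (out : List (List (String × Int))),
    (∀ d ∈ l, ((PySem.Dict.mk d).contains "page") = true) →
    (l.foldl
      (fun (st : PySem.Dict Int Int × List (List (String × Int))) description =>
        match (PySem.Dict.mk description).get? "page" with
        | none => st
        | some page =>
            let page_counts :=
              if (st.1.contains page) = false
              then st.1.insert page 1
              else st.1.modify page 0 (· + 1)
            (page_counts,
             st.2 ++ [((PySem.Dict.mk description).insert "number" (page_counts.getD page 0)).items]))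
      (c, out)).2 = out ++ numb c l := by
  induction l with
  | nil => intro c out _; simp [numb]
  | cons d t ih =>
      intro c out h
      have hd : ((PySem.Dict.mk d).contains "page") = true := h d (List.mem_cons_self ..)
      rw [PySem.Dict.contains_eq_isSome_get?] at hd
      obtain ⟨v, hv⟩ := Option.isSome_iff_exists.mp hd
      have hpg : pg d = v := by
        simp [pg, PySem.Dict.getD_eq_get?_getD, hv]
      simp only [List.foldl_cons, hv]
      by_cases hc : c.contains v = true
      · have hif : (if c.contains v = false then c.insert v 1 else c.modify v 0 (· + 1))
            = c.modify v 0 (· + 1) := by rw [hc]; simp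
        simp only [hif]
        rw [ih _ _ (fun e he => h e (List.mem_cons_of_mem _ he))]
        simp only [numb, hpg, List.append_assoc, List.singleton_append]
        congr 2
        rw [PySem.Dict.getD_modify_self]
        rfl
      · have hcf : c.contains v = false := eq_false_of_ne_true hc
        have hif : (if c.contains v = false then c.insert v 1 else c.modify v 0 (· + 1))
            = c.insert v 1 := by rw [hcf]; simp
        simp only [hif]
        rw [ih _ _ (fun e he => h e (List.mem_cons_of_mem _ he))]
        simp only [numb, hpg, List.append_assoc, List.singleton_append]
        have hc0 : c.getD v 0 = 0 := PySem.Dict.getD_of_not_contains _ _ hcf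
        congr 2
        · rw [PySem.Dict.getD_insert_self, hc0]
          rfl
        · refine numb_congr _ _ _ (fun p => ?_)
          rw [PySem.Dict.getD_insert, PySem.Dict.getD_modify]
          split_ifs <;> simp [hc0]

-- pointwise value of numb
theorem numb_length (c : PySem.Dict Int Int) (l : List (List (String × Int))) :
    (numb c l).length = l.length := by
  induction l generalizing c with
  | nil => rfl
  | cons d t ih => simp [numb, ih]

theorem numb_getElem (l : List (List (String × Int))) :
    ∀ (c : PySem.Dict Int Int) (k : Nat) (hk : k < l.length),
    (numb c l)[k]'(by rw [numb_length]; exact hk) =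
      withNum (l[k]'hk) (c.getD (pg (l[k]'hk)) 0 + ((l.take (k + 1)).countP (fun e => pg e == pg (l[k]'hk)) : Int)) := by
  induction l with
  | nil => intro c k hk; simp at hk
  | cons d t ih =>
      intro c k hk
      cases k with
      | zero =>
          simp [numb]
      | succ k =>
          have hk' : k < t.length := by simpa using hk
          have := ih (c.modify (pg d) 0 (· + 1)) k hk'
          simp only [numb, List.getElem_cons_succ]
          rw [this]
          have htake : (d :: t).take (k + 1 + 1) = d :: t.take (k + 1) := rfl
          rw [htake, List.countP_cons]
          congr 1
          rw [PySem.Dict.getD_modify]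
          by_cases hpd : pg (t[k]'hk') = pg d
          · simp [hpd]
            ring
          · have : (pg d == pg (t[k]'hk')) = false := by
              simp
              exact fun h => hpd h.symm
            simp [hpd, this]

-- ---------- B-side ----------

-- indices of the entries whose page is p, in order
def idxsOf (l : List (List (String × Int))) (p : Int) : List Int :=
  ((PySem.List.enumerate l).filter (fun q => pg q.2 == p)).map (fun q => q.1)

-- one group's numbering pass
def innerF (arr : List (List (String × Int))) (idxs : List Int) (s : Int) : List (List (String × Int)) :=
  (PySem.List.enumerate idxs s).foldl
    (fun arr q => arr.set q.2.toNat (withNum (arr.getD q.2.toNat []) q.1)) arr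

theorem innerF_cons (arr : List (List (String × Int))) (i : Int) (is : List Int) (s : Int) :
    innerF arr (i :: is) s
      = innerF (arr.set i.toNat (withNum (arr.getD i.toNat []) s)) is (s + 1) := by
  simp [innerF, PySem.List.enumerate_cons, withNum]

theorem innerF_length (idxs : List Int) : ∀ arr s, (innerF arr idxs s).length = arr.length := by
  induction idxs with
  | nil => intro arr s; rfl
  | cons i is ih => intro arr s; rw [innerF_cons, ih]; simp

theorem innerF_not_mem (idxs : List Int) : ∀ arr s (k : Nat),
    (∀ i ∈ idxs, 0 ≤ i) → (k : Int) ∉ idxs → (innerF arr idxs s)[k]? = arr[k]? := by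
  induction idxs with
  | nil => intro arr s k _ _; rfl
  | cons i is ih =>
      intro arr s k hpos hmem
      rw [innerF_cons, ih _ _ _ (fun j hj => hpos j (List.mem_cons_of_mem _ hj))
            (fun h => hmem (List.mem_cons_of_mem _ h))]
      refine List.getElem?_set_ne ?_
      intro h
      apply hmem
      have h0 : 0 ≤ i := hpos i (List.mem_cons_self ..)
      have : (k : Int) = i := by omega
      rw [this]
      exact List.mem_cons_self ..

theorem innerF_found (arr : List (List (String × Int))) (s : Int) (k : Nat)
    (as bs : List Int) (hk : k < arr.length)
    (has : ∀ i ∈ as, 0 ≤ i) (hbs : ∀ i ∈ bs, 0 ≤ i)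
    (hkas : (k : Int) ∉ as) (hkbs : (k : Int) ∉ bs) :
    (innerF arr (as ++ (k : Int) :: bs) s)[k]? = some (withNum (arr[k]'hk) (s + as.length)) := by
  induction as generalizing arr s with
  | nil =>
      rw [List.nil_append, innerF_cons]
      have htn : (k : Int).toNat = k := rfl
      rw [htn]
      have hget : arr.getD k [] = arr[k]'hk := List.getD_eq_getElem arr [] hk
      rw [innerF_not_mem _ _ _ _ hbs hkbs, hget]
      rw [List.getElem?_set_self (by simpa using hk)]
      simp
  | cons a as' ih =>
      rw [List.cons_append, innerF_cons]
      have ha0 : 0 ≤ a := has a (List.mem_cons_self ..)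
      have hak : a.toNat ≠ k := by
        intro h
        apply hkas
        have : a = (k : Int) := by omega
        exact this ▸ List.mem_cons_self ..
      have hk2 : k < (arr.set a.toNat (withNum (arr.getD a.toNat []) s)).length := by simpa using hk
      have := ih (arr.set a.toNat (withNum (arr.getD a.toNat []) s)) (s + 1) hk2
        (fun j hj => has j (List.mem_cons_of_mem _ hj))
        (fun h => hkas (List.mem_cons_of_mem _ h))
      rw [this]
      rw [List.getElem_set_ne hak]
      congr 2
      simp
      ring

theorem length_filter_enumerate {α : Type} (f : α → Bool) (xs : List α) :
    ∀ s, ((PySem.List.enumerate xs s).filter (fun q => f q.2)).length = xs.countP f := by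
  induction xs with
  | nil => intro s; rfl
  | cons x t ih =>
      intro s
      rw [PySem.List.enumerate_cons, List.filter_cons, List.countP_cons]
      by_cases hx : f x = true
      · simp [hx, ih]
      · simp [hx, ih]

theorem mem_idxsOf (l : List (List (String × Int))) (p i : Int) (h : i ∈ idxsOf l p) :
    ∃ (j : Nat) (hj : j < l.length), i = (j : Int) ∧ pg (l[j]'hj) = p := by
  simp only [idxsOf, List.mem_map, List.mem_filter] at h
  obtain ⟨q, ⟨hq, hfq⟩, hqi⟩ := h
  rw [PySem.List.mem_enumerate_iff] at hq
  obtain ⟨j, hj, rfl⟩ := hq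
  refine ⟨j, hj, by simpa using hqi.symm, ?_⟩
  simpa using hfq

theorem idxsOf_split (l : List (List (String × Int))) (p : Int) (k : Nat) (hk : k < l.length)
    (hp : pg (l[k]'hk) = p) :
    ∃ as bs : List Int, idxsOf l p = as ++ (k : Int) :: bs
      ∧ (∀ i ∈ as, 0 ≤ i ∧ i ≠ (k : Int)) ∧ (∀ i ∈ bs, 0 ≤ i ∧ i ≠ (k : Int))
      ∧ as.length = (l.take k).countP (fun e => pg e == p) := by
  have hlen : (l.take k).length = k := by simp [List.length_take]; omega
  have hdecomp : l = l.take k ++ (l[k]'hk) :: l.drop (k + 1) := by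
    rw [← List.drop_eq_getElem_cons hk, List.take_append_drop]
  refine ⟨((PySem.List.enumerate (l.take k) 0).filter (fun q => pg q.2 == p)).map (fun q => q.1),
         ((PySem.List.enumerate (l.drop (k + 1)) ((0 : Int) + (l.take k).length + 1)).filter
            (fun q => pg q.2 == p)).map (fun q => q.1), ?_, ?_, ?_, ?_⟩
  · conv_lhs => rw [idxsOf]
    conv_lhs => rw [hdecomp]
    rw [PySem.List.enumerate_append, PySem.List.enumerate_cons, List.filter_append,
        List.filter_cons, List.map_append, hlen]
    simp [hp]
  · intro i hi
    simp only [List.mem_map, List.mem_filter] at hi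
    obtain ⟨q, ⟨hq, _⟩, rfl⟩ := hi
    rw [PySem.List.mem_enumerate_iff] at hq
    obtain ⟨j, hj, rfl⟩ := hq
    rw [hlen] at hj
    constructor <;> [simp; (simp; omega)]
  · intro i hi
    simp only [List.mem_map, List.mem_filter] at hi
    obtain ⟨q, ⟨hq, _⟩, rfl⟩ := hi
    rw [PySem.List.mem_enumerate_iff] at hq
    obtain ⟨j, hj, rfl⟩ := hq
    rw [hlen]
    constructor <;> simp <;> omega
  · rw [List.length_map, length_filter_enumerate (fun e => pg e == p) (l.take k) 0]

theorem outer_length (l : List (List (String × Int))) (ps : List Int) :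
    ∀ arr, (ps.foldl (fun arr p => innerF arr (idxsOf l p) 1) arr).length = arr.length := by
  induction ps with
  | nil => intro arr; rfl
  | cons p ps ih => intro arr; rw [List.foldl_cons, ih, innerF_length]

theorem outer_spec (l : List (List (String × Int))) :
    ∀ (ps : List Int) (arr : List (List (String × Int))), ps.Nodup → arr.length = l.length →
    (∀ (k : Nat) (hk : k < l.length), pg (l[k]'hk) ∈ ps → arr[k]? = some (l[k]'hk)) →
    ∀ (k : Nat) (hk : k < l.length),
      (ps.foldl (fun arr p => innerF arr (idxsOf l p) 1) arr)[k]? =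
        if pg (l[k]'hk) ∈ ps
        then some (withNum (l[k]'hk) (((l.take (k + 1)).countP (fun e => pg e == pg (l[k]'hk)) : Int)))
        else arr[k]? := by
  intro ps
  induction ps with
  | nil => intro arr _ _ _ k hk; simp
  | cons p ps ih =>
      intro arr hnd harr hinv k hk
      have hpnotin : p ∉ ps := (List.nodup_cons.mp hnd).1
      rw [List.foldl_cons]
      have harr' : (innerF arr (idxsOf l p) 1).length = l.length := by
        rw [innerF_length]; exact harr
      have hpos : ∀ i ∈ idxsOf l p, 0 ≤ i := by
        intro i hi
        obtain ⟨j, hj, rfl, _⟩ := mem_idxsOf _ _ _ hi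
        positivity
      have hinv' : ∀ (k' : Nat) (hk' : k' < l.length), pg (l[k']'hk') ∈ ps →
          (innerF arr (idxsOf l p) 1)[k']? = some (l[k']'hk') := by
        intro k' hk' hmem
        have hne : pg (l[k']'hk') ≠ p := fun h => hpnotin (h ▸ hmem)
        have hnotin : (k' : Int) ∉ idxsOf l p := by
          intro hin
          obtain ⟨j, hj, hij, hpj⟩ := mem_idxsOf _ _ _ hin
          have : j = k' := by omega
          subst this
          exact hne hpj
        rw [innerF_not_mem _ _ _ _ hpos hnotin]
        exact hinv k' hk' (List.mem_cons_of_mem _ hmem)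
      have IH := ih (innerF arr (idxsOf l p) 1) (List.nodup_cons.mp hnd).2 harr' hinv' k hk
      by_cases hcase : pg (l[k]'hk) = p
      · have hnotps : pg (l[k]'hk) ∉ ps := fun h => hpnotin (hcase ▸ h)
        rw [IH, if_neg hnotps, if_pos (List.mem_cons.mpr (Or.inl hcase))]
        obtain ⟨as, bs, hsplit, has, hbs, hlenas⟩ := idxsOf_split l p k hk hcase
        have hkarr : k < arr.length := by omega
        rw [hsplit, innerF_found arr 1 k as bs hkarr
              (fun i hi => (has i hi).1) (fun i hi => (hbs i hi).1)
              (fun h => ((has _ h).2 rfl).elim) (fun h => ((hbs _ h).2 rfl).elim)]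
        have harrk : arr[k]'hkarr = l[k]'hk := by
          have := hinv k hk (List.mem_cons.mpr (Or.inl hcase))
          rw [List.getElem?_eq_getElem hkarr] at this
          exact Option.some_injective _ this
        rw [harrk]
        congr 2
        have htake : l.take (k + 1) = l.take k ++ [l[k]'hk] := by
          rw [List.take_add_one, List.getElem?_eq_getElem hk]
          rfl
        rw [htake, List.countP_append, hlenas, hcase]
        simp
        omega
      · have hiff : (pg (l[k]'hk) ∈ p :: ps) ↔ (pg (l[k]'hk) ∈ ps) := by
          rw [List.mem_cons]
          exact ⟨fun h => h.resolve_left hcase, Or.inr⟩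
        have hnotin : (k : Int) ∉ idxsOf l p := by
          intro hin
          obtain ⟨j, hj, hij, hpj⟩ := mem_idxsOf _ _ _ hin
          have : j = k := by omega
          subst this
          exact hcase hpj
        rw [IH]
        by_cases hmem : pg (l[k]'hk) ∈ ps
        · rw [if_pos hmem, if_pos (hiff.mpr hmem)]
        · rw [if_neg hmem, if_neg (fun h => hmem (hiff.mp h)),
              innerF_not_mem _ _ _ _ hpos hnotin]

theorem organize_image_metadata_spec' (descriptions : List (List (String × Int)))
    (h : Pre_organize_image_metadata descriptions) :
    organize_image_metadata descriptions = organize_image_metadata_alt descriptions := by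
  unfold Pre_organize_image_metadata at h
  rw [List.all_eq_true] at h
  have hcont : ∀ d ∈ descriptions, ((PySem.Dict.mk d).contains "page") = true := fun d hd => by
    simpa using h d hd
  -- A's value, pointwise
  have hA : organize_image_metadata descriptions = numb (PySem.Dict.mk []) descriptions := by
    unfold organize_image_metadata
    rw [foldlA_eq_numb descriptions (PySem.Dict.mk []) [] hcont]
    rfl
  -- B: the grouping dict
  have hGcongr :
      (PySem.List.enumerate descriptions).foldl
        (fun (g : PySem.Dict Int (List Int)) q =>
          match (PySem.Dict.mk q.2).get? "page" with
          | none => g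
          | some page => g.modify page [] (· ++ [q.1]))
        (PySem.Dict.mk [])
      = (PySem.List.enumerate descriptions).foldl
          (fun g q => g.modify (pg q.2) [] (· ++ [q.1])) (PySem.Dict.mk []) := by
    refine PySem.List.foldl_congr_mem _ _ _ _ ?_
    intro g q hq
    rw [PySem.List.mem_enumerate_iff] at hq
    obtain ⟨j, hj, rfl⟩ := hq
    have hd := hcont _ (List.getElem_mem hj)
    rw [PySem.Dict.contains_eq_isSome_get?] at hd
    obtain ⟨v, hv⟩ := Option.isSome_iff_exists.mp hd
    have hpg : pg (descriptions[j]'hj) = v := by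
      simp [pg, PySem.Dict.getD_eq_get?_getD, hv]
    simp [hv, hpg]
  set G := (PySem.List.enumerate descriptions).foldl
      (fun (g : PySem.Dict Int (List Int)) q => g.modify (pg q.2) [] (· ++ [q.1]))
      (PySem.Dict.mk []) with hGdef
  have hmkkeys : (PySem.Dict.mk ([] : List (Int × List Int))).keys = [] := rfl
  have hnodup : G.keys.Nodup := by
    refine PySem.Dict.nodup_keys_foldl_modify_key _
      (fun (q : Int × List (String × Int)) => pg q.2) []
      (fun (d : PySem.Dict Int (List Int)) (q : Int × List (String × Int)) => (· ++ [q.1])) _ ?_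
    rw [hmkkeys]; exact List.nodup_nil
  have hsnd : (PySem.List.enumerate descriptions).map (fun q => pg q.2) = descriptions.map pg := by
    have := PySem.List.map_snd_enumerate descriptions 0
    calc (PySem.List.enumerate descriptions).map (fun q => pg q.2)
        = ((PySem.List.enumerate descriptions).map (fun q => q.2)).map pg := by
          rw [List.map_map]; rfl
      _ = descriptions.map pg := by rw [this]
  have hkeys : G.keys = PySem.Set.ofList (descriptions.map pg) := by
    rw [hGdef, PySem.Dict.keys_foldl_modify_key _
      (fun (q : Int × List (String × Int)) => pg q.2) []
      (fun (d : PySem.Dict Int (List Int)) (q : Int × List (String × Int)) => (· ++ [q.1])),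
      hmkkeys, hsnd]
    rfl
  have hgetD : ∀ p, G.getD p [] = idxsOf descriptions p := by
    intro p
    have hfold : G = ((PySem.List.enumerate descriptions).map (fun q => (pg q.2, q.1))).foldl
        (fun d r => d.modify r.1 [] (· ++ [r.2])) (PySem.Dict.mk []) := by
      rw [List.foldl_map]
    rw [hfold, PySem.Dict.getD_foldl_modify_append]
    have hmk : (PySem.Dict.mk ([] : List (Int × List Int))).getD p [] = [] := rfl
    rw [hmk, List.nil_append]
    simp only [idxsOf, List.filter_map, List.map_map]
    rfl
  have hvalues : G.values = (PySem.Set.ofList (descriptions.map pg)).map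
      (fun p => idxsOf descriptions p) := by
    rw [PySem.Dict.values_eq_map_keys G hnodup [], hkeys]
    exact List.map_congr_left (fun p _ => hgetD p)
  -- rewrite B into the outer innerF fold
  have hB1 : organize_image_metadata_alt descriptions
      = G.values.foldl (fun arr idxs => innerF arr idxs 1) descriptions := by
    unfold organize_image_metadata_alt
    rw [hGcongr]
    rfl
  have hB : organize_image_metadata_alt descriptions
      = (PySem.Set.ofList (descriptions.map pg)).foldl
          (fun arr p => innerF arr (idxsOf descriptions p) 1) descriptions := by
    rw [hB1, hvalues, List.foldl_map]
  -- pointwise comparison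
  rw [hA, hB]
  apply List.ext_getElem?
  intro k
  by_cases hk : k < descriptions.length
  · have hBk := outer_spec descriptions (PySem.Set.ofList (descriptions.map pg)) descriptions
      (PySem.Set.nodup_ofList _) rfl
      (fun k' hk' _ => List.getElem?_eq_getElem hk') k hk
    have hmem : pg (descriptions[k]'hk) ∈ PySem.Set.ofList (descriptions.map pg) := by
      rw [PySem.Set.mem_ofList]
      exact List.mem_map.mpr ⟨_, List.getElem_mem hk, rfl⟩
    rw [hBk, if_pos hmem]
    have hkn : k < (numb (PySem.Dict.mk []) descriptions).length := by
      rw [numb_length]; exact hk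
    rw [List.getElem?_eq_getElem hkn, numb_getElem descriptions (PySem.Dict.mk []) k hk]
    have h0 : (PySem.Dict.mk ([] : List (Int × Int))).getD (pg (descriptions[k]'hk)) 0 = 0 := rfl
    rw [h0, zero_add]
  · rw [List.getElem?_eq_none, List.getElem?_eq_none]
    · rw [outer_length]; omega
    · rw [numb_length]; omega

-- ===== VERDICT (by name: the statement is the Claim_ definition above) =====
theorem organize_image_metadata_spec : Claim_equal_organize_image_metadata := by
  intro descriptions _ hpre
  exact organize_image_metadata_spec' descriptions hpre
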